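-- pv_equiv track=rewrite | github.com/NestorPala/Algo1 | baldosas_rva.py | pintar_baldosas
-- ===== SOURCE A (Python) =====
-- def obtener_siguiente_color(color: str):
--     siguiente_color = ""
--
--     if color == "R":
--         siguiente_color = "V"
--     elif color == "V":
--         siguiente_color = "A"
--     elif color == "A":
--         siguiente_color = "R"
--
--     return siguiente_color
--
-- def pintar_baldosas(camino: str, colores: list) -> str:
--     baldosas = list()
--     baldosas2 = str()
--
--     for baldosa in camino:
--         baldosas.append(baldosa)
--
--     for i in range(len(colores)):
--         if colores[i] in baldosas:
--             color_pintado = colores[i]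
--
--     ubicacion_pintada = baldosas.index(color_pintado)
--     color = color_pintado
--     h = 0
--
--     # El rango escapa de len(baldosas)-1 pero lo solucionamos con la variable h
--     for i in range(ubicacion_pintada, ubicacion_pintada + len(baldosas)):
--
--         # La lógica se simplifica bastante utilizando una función que devuelva el color a pintar
--         color = obtener_siguiente_color(color)
--
--         if i < len(baldosas) - 1:
--             baldosas[i + 1] = color
--         else:
--             baldosas[h] = color
--             h += 1
--
--     # Armo el string
--     for i in range(len(baldosas)):
--         baldosas2 += baldosas[i]
--
--     return baldosas2
-- ===== SOURCE B (Python) =====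
-- def obtener_siguiente_color(color: str):
--     siguiente_color = ""
--
--     if color == "R":
--         siguiente_color = "V"
--     elif color == "V":
--         siguiente_color = "A"
--     elif color == "A":
--         siguiente_color = "R"
--
--     return siguiente_color
--
-- def pintar_baldosas(camino: str, colores: list) -> str:
--     # Generate the n successive repaint colors once, then rotate them into
--     # place with a slice instead of writing into the tile list with a
--     # wraparound index.
--     baldosas = list(camino)
--     for c in colores:
--         if c in baldosas:
--             color_pintado = c
--     p = baldosas.index(color_pintado)
--     nuevos = []
--     color = color_pintado
--     for _ in baldosas:
--         color = obtener_siguiente_color(color)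
--         nuevos.append(color)
--     return "".join(nuevos[-(p + 1):] + nuevos[:-(p + 1)])
-- ===== Notes on version B (the rewrite author's own statement) =====
-- stated objective: simpler
-- what changed: A repaints by writing into the tile list in place, threading a running color through an index loop that wraps around with an auxiliary counter h and then rebuilding the string position by position; B generates the sequence of n successive colors once into a list, rotates it into place with a single slice, and joins it.
import Mathlib
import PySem

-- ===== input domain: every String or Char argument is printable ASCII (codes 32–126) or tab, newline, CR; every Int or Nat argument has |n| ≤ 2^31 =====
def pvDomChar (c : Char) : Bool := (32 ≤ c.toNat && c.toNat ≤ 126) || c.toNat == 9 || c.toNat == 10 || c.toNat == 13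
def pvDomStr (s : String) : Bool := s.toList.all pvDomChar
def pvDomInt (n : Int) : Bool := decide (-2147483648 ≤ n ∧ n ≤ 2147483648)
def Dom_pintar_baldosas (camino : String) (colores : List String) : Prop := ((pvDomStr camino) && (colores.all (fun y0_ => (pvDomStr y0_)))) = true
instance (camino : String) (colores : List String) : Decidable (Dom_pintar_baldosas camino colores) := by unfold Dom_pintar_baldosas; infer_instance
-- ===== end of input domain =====

-- B generates the n successive repaint colors once into a list, rotates it with one
-- slice and joins it, instead of A's in-place tile writes through a wrapping index.

-- ===== PORT A =====
def obtener_siguiente_color (color : String) : String :=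
  if color = "R" then "V"
  else if color = "V" then "A"
  else if color = "A" then "R"
  else ""

-- loop body of A's main for-loop (one iteration, state = (baldosas, color, h))
def pasoA (st : List String × String × Nat) (i : Int) : List String × String × Nat :=
  let color := obtener_siguiente_color st.2.1
  if i < (st.1.length : Int) - 1 then
    (st.1.set (i + 1).toNat color, color, st.2.2)   -- i ≥ 0 throughout the loop, so .toNat is exact here
  else
    (st.1.set st.2.2 color, color, st.2.2 + 1)

def pintar_baldosas (camino : String) (colores : List String) : String :=
  let baldosas : List String := camino.toList.foldl (fun acc b => acc ++ [String.singleton b]) []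
  let color_pintado : Option String :=
    (PySem.List.pyRange 0 (colores.length : Int)).foldl
      (fun acc i => if PySem.List.pyGetD colores i "" ∈ baldosas then some (PySem.List.pyGetD colores i "") else acc)
      none
  match color_pintado with
  | none => ""          -- Python raises NameError here (color_pintado unbound); excluded by Pre_
  | some cp =>
    match PySem.List.index? baldosas cp with
    | none => ""        -- unreachable: the fold only returns elements of baldosas
    | some ub =>
      let fin := List.foldl pasoA (baldosas, cp, 0)
        (PySem.List.pyRange (ub : Int) ((ub : Int) + (baldosas.length : Int)))
      (PySem.List.pyRange 0 (fin.1.length : Int)).foldl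
        (fun acc i => acc ++ PySem.List.pyGetD fin.1 i "") ""

-- ===== PORT B =====
def pintar_baldosas_alt (camino : String) (colores : List String) : String :=
  let baldosas : List String := camino.toList.map String.singleton    -- list(camino)
  let cp? : Option String :=
    colores.foldl (fun acc c => if c ∈ baldosas then some c else acc) none
  match cp? with
  | none => ""          -- Python raises NameError here; excluded by Pre_
  | some cp =>
    match PySem.List.index? baldosas cp with
    | none => ""        -- unreachable: the fold only returns elements of baldosas
    | some p =>
      let nuevos : List String :=
        (baldosas.foldl (fun (st : List String × String) _ =>
          let color := obtener_siguiente_color st.2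
          (st.1 ++ [color], color)) ([], cp)).1
      (PySem.List.slice nuevos (some (-((p : Int) + 1))) none
        ++ PySem.List.slice nuevos none (some (-((p : Int) + 1)))).foldl (· ++ ·) ""

-- ===== PRECONDITION & SPEC =====
-- Pre_ excludes exactly the inputs on which Python A raises NameError: no element of
-- colores occurs as a (single-character) tile of camino, so color_pintado is never bound.
def Pre_pintar_baldosas (camino : String) (colores : List String) : Prop :=
  (colores.any (fun c => camino.toList.any (fun ch => c.toList == [ch]))) = true
instance (camino : String) (colores : List String) : Decidable (Pre_pintar_baldosas camino colores) := by
  unfold Pre_pintar_baldosas; infer_instance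

def pvWitness_pintar_baldosas : String × List String := ("RVXA", ["V", "X"])

def Spec_pintar_baldosas (camino : String) (colores : List String) (out : String) : Prop := out = pintar_baldosas_alt camino colores
instance (camino : String) (colores : List String) (out : String) : Decidable (Spec_pintar_baldosas camino colores out) := by unfold Spec_pintar_baldosas; infer_instance

-- ===== CLAIM (what is proved, stated in full; the proofs are below) =====
def Claim_equal_pintar_baldosas : Prop := ∀ (camino : String) (colores : List String), Dom_pintar_baldosas camino colores → Pre_pintar_baldosas camino colores → Spec_pintar_baldosas camino colores (pintar_baldosas camino colores)

-- ===== LEMMAS AND PROOFS =====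

-- number of next-steps the tile at position q has received when A's loop finishes
def pvK (p n q : Nat) : Nat := if p < q then q - p else q + n - p

-- contents of A's list after t loop iterations
def pvG (cs : List Char) (cp : String) (p n t q : Nat) : String :=
  if pvK p n q ≤ t then obtener_siguiente_color^[pvK p n q] cp
  else (cs.map String.singleton).getD q ""

-- a last-match fold that returns some cp returned a matching element
theorem pv_sel_fold_some {P : String → Prop} [DecidablePred P] (l : List String)
    (acc : Option String) (cp : String)
    (h : l.foldl (fun acc c => if P c then some c else acc) acc = some cp) :
    P cp ∨ acc = some cp := by
  induction l generalizing acc with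
  | nil => exact Or.inr h
  | cons x xs ih =>
      simp only [List.foldl_cons] at h
      rcases ih _ h with hP | hacc
      · exact Or.inl hP
      · by_cases hx : P x
        · rw [if_pos hx] at hacc; exact Or.inl (Option.some_inj.mp hacc ▸ hx)
        · rw [if_neg hx] at hacc; exact Or.inr hacc

theorem pv_sel_fold_ne_none {P : String → Prop} [DecidablePred P] (l : List String)
    (x : String) : l.foldl (fun acc c => if P c then some c else acc) (some x) ≠ none := by
  induction l generalizing x with
  | nil => simp
  | cons y ys ih =>
      simp only [List.foldl_cons]
      by_cases hy : P y
      · rw [if_pos hy]; exact ih y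
      · rw [if_neg hy]; exact ih x

-- a last-match fold from none that returns none saw no matching element
theorem pv_sel_fold_none {P : String → Prop} [DecidablePred P] (l : List String)
    (h : l.foldl (fun acc c => if P c then some c else acc) none = none) :
    ∀ c ∈ l, ¬ P c := by
  induction l with
  | nil => intro c hc; cases hc
  | cons x xs ih =>
      intro c hc
      simp only [List.foldl_cons] at h
      by_cases hx : P x
      · rw [if_pos hx] at h
        exact absurd h (pv_sel_fold_ne_none xs x)
      · rw [if_neg hx] at h
        rcases List.mem_cons.mp hc with rfl | hc'
        · exact hx
        · exact ih h c hc'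

theorem pv_step_eq (cs : List Char) (cp : String) (p t : Nat) (hp : p < cs.length)
    (ht : t + 1 ≤ cs.length) :
    pasoA ((List.range cs.length).map (pvG cs cp p cs.length t),
           obtener_siguiente_color^[t] cp, t - min t (cs.length - 1 - p)) ((p : Int) + (t : Int))
    = ((List.range cs.length).map (pvG cs cp p cs.length (t + 1)),
       obtener_siguiente_color^[t + 1] cp, (t + 1) - min (t + 1) (cs.length - 1 - p)) := by
  have hval : obtener_siguiente_color (obtener_siguiente_color^[t] cp)
      = obtener_siguiente_color^[t + 1] cp := (Function.iterate_succ_apply' _ _ _).symm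
  unfold pasoA
  simp only [List.length_map, List.length_range, hval]
  by_cases hc : ((p : Int) + (t : Int)) < (cs.length : Int) - 1
  · rw [if_pos hc]
    have hpt : p + t + 1 < cs.length := by omega
    have hidx : ((p : Int) + (t : Int) + 1).toNat = p + t + 1 := by omega
    simp only [Prod.mk.injEq]
    refine ⟨?_, trivial, by omega⟩
    rw [hidx]
    apply List.ext_getElem (by simp)
    intro q hq1 hq2
    rw [List.getElem_set]
    simp only [List.getElem_map, List.getElem_range]
    simp only [List.length_map, List.length_range] at hq2
    by_cases hq : p + t + 1 = q
    · rw [if_pos hq]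
      have hk : pvK p cs.length q = t + 1 := by unfold pvK; split <;> omega
      unfold pvG
      rw [hk, if_pos le_rfl]
    · rw [if_neg hq]
      have hk : pvK p cs.length q ≠ t + 1 := by unfold pvK; split <;> omega
      unfold pvG
      have hiff : (pvK p cs.length q ≤ t + 1) ↔ (pvK p cs.length q ≤ t) := by omega
      simp only [hiff]
  · rw [if_neg hc]
    simp only [Prod.mk.injEq]
    refine ⟨?_, trivial, by omega⟩
    have hh : t - min t (cs.length - 1 - p) = t - (cs.length - 1 - p) := by omega
    apply List.ext_getElem (by simp)
    intro q hq1 hq2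
    rw [List.getElem_set]
    simp only [List.getElem_map, List.getElem_range]
    simp only [List.length_map, List.length_range] at hq2
    by_cases hq : t - min t (cs.length - 1 - p) = q
    · rw [if_pos hq]
      have hk : pvK p cs.length q = t + 1 := by unfold pvK; split <;> omega
      unfold pvG
      rw [hk, if_pos le_rfl]
    · rw [if_neg hq]
      have hk : pvK p cs.length q ≠ t + 1 := by unfold pvK; split <;> omega
      unfold pvG
      have hiff : (pvK p cs.length q ≤ t + 1) ↔ (pvK p cs.length q ≤ t) := by omega
      simp only [hiff]

theorem pv_loop_inv (cs : List Char) (cp : String) (p : Nat) (hp : p < cs.length) :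
    ∀ t, t ≤ cs.length →
    List.foldl pasoA (cs.map String.singleton, cp, 0)
      (PySem.List.pyRange (p : Int) ((p : Int) + (t : Int)))
    = ((List.range cs.length).map (pvG cs cp p cs.length t),
       obtener_siguiente_color^[t] cp, t - min t (cs.length - 1 - p)) := by
  intro t
  induction t with
  | zero =>
      intro _
      rw [show ((p : Int) + ((0 : Nat) : Int)) = (p : Int) by simp,
          PySem.List.pyRange_one_eq_nil le_rfl]
      simp only [List.foldl_nil, Prod.mk.injEq]
      refine ⟨?_, by simp, by omega⟩
      apply List.ext_getElem (by simp)
      intro q hq1 hq2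
      simp only [List.getElem_map, List.getElem_range]
      have hk : ¬ pvK p cs.length q ≤ 0 := by
        have : 1 ≤ pvK p cs.length q := by
          unfold pvK; simp only [List.length_map] at hq1; split <;> omega
        omega
      unfold pvG
      rw [if_neg hk]
      simp only [List.length_map] at hq1
      rw [List.getD_eq_getElem _ _ (by simpa using hq1), List.getElem_map]
  | succ t ih =>
      intro ht
      have ht' : t ≤ cs.length := by omega
      rw [show ((p : Int) + (((t + 1 : Nat)) : Int)) = ((p : Int) + (t : Int)) + 1 by push_cast; ring,
          PySem.List.pyRange_one_succ_right (by omega), List.foldl_append, ih ht']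
      simp only [List.foldl_cons, List.foldl_nil]
      exact pv_step_eq cs cp p t hp ht

-- B's generation loop produces the successive iterates of the next-color function
theorem pv_gen_fold (cp : String) (l : List String) (j : Nat) :
    l.foldl (fun (st : List String × String) _ =>
        let color := obtener_siguiente_color st.2
        (st.1 ++ [color], color))
      ((List.range j).map (fun i => obtener_siguiente_color^[i + 1] cp),
       obtener_siguiente_color^[j] cp)
    = ((List.range (j + l.length)).map (fun i => obtener_siguiente_color^[i + 1] cp),
       obtener_siguiente_color^[j + l.length] cp) := by
  induction l generalizing j with
  | nil => simp
  | cons x xs ih =>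
      simp only [List.foldl_cons]
      have h1 : obtener_siguiente_color (obtener_siguiente_color^[j] cp)
          = obtener_siguiente_color^[j + 1] cp := (Function.iterate_succ_apply' _ _ _).symm
      rw [h1, show (List.range j).map (fun i => obtener_siguiente_color^[i + 1] cp)
            ++ [obtener_siguiente_color^[j + 1] cp]
          = (List.range (j + 1)).map (fun i => obtener_siguiente_color^[i + 1] cp) by
        rw [List.range_succ, List.map_append]; rfl]
      rw [ih (j + 1)]
      simp only [List.length_cons]
      rw [show j + 1 + xs.length = j + (xs.length + 1) from by omega]

-- rotating B's generated list by p+1 from the end yields exactly A's final tile list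
theorem pv_rotate_eq (cs : List Char) (cp : String) (p : Nat) (hp : p < cs.length) :
    (let L := (List.range cs.length).map (fun i => obtener_siguiente_color^[i + 1] cp)
     L.drop (cs.length - (p + 1)) ++ L.take (cs.length - (p + 1)))
    = (List.range cs.length).map (pvG cs cp p cs.length cs.length) := by
  set n := cs.length with hn
  set L := (List.range n).map (fun i => obtener_siguiente_color^[i + 1] cp) with hL
  have hLlen : L.length = n := by simp [hL]
  have hlen : (L.drop (n - (p + 1)) ++ L.take (n - (p + 1))).length = n := by
    simp only [List.length_append, List.length_drop, List.length_take, hLlen]; omega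
  apply List.ext_getElem (by simpa using hlen)
  intro q hq1 hq2
  simp only [List.length_map, List.length_range] at hq2
  have hdl : (L.drop (n - (p + 1))).length = p + 1 := by
    rw [List.length_drop, hLlen]; omega
  simp only [List.getElem_map, List.getElem_range]
  have hG : pvG cs cp p n n q = obtener_siguiente_color^[pvK p n q] cp := by
    unfold pvG
    rw [if_pos (by unfold pvK; split <;> omega)]
  rw [hG]
  by_cases hc : q < p + 1
  · rw [List.getElem_append_left (by simp only [List.length_drop, hLlen]; omega)]
    rw [List.getElem_drop]
    simp only [hL, List.getElem_map, List.getElem_range]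
    congr 1
    unfold pvK
    rw [if_neg (by omega)]
    omega
  · have hql : (L.drop (n - (p + 1))).length ≤ q := by
      simp only [List.length_drop, hLlen]; omega
    rw [List.getElem_append_right hql]
    simp only [List.length_drop, hLlen]
    rw [List.getElem_take]
    simp only [hL, List.getElem_map, List.getElem_range]
    congr 1
    unfold pvK
    rw [if_pos (by omega)]
    omega

theorem pv_main (camino : String) (colores : List String)
    (hpre : ∃ c ∈ colores, c ∈ camino.toList.map String.singleton) :
    pintar_baldosas camino colores = pintar_baldosas_alt camino colores := by
  simp only [pintar_baldosas, pintar_baldosas_alt,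
    PySem.List.foldl_append_singleton_eq_map, List.nil_append]
  rw [PySem.List.foldl_pyRange_zero_pyGetD' colores ""
      (fun acc c => if c ∈ List.map String.singleton camino.toList then some c else acc) none]
  rcases hsel : colores.foldl
      (fun acc c => if c ∈ List.map String.singleton camino.toList then some c else acc) none
      with _ | cp
  · -- impossible under Pre_
    exfalso
    obtain ⟨c, hc, hmem⟩ := hpre
    exact pv_sel_fold_none colores hsel c hc hmem
  · simp only []
    have hmem : cp ∈ List.map String.singleton camino.toList := by
      rcases pv_sel_fold_some colores none cp hsel with h | h
      · exact h
      · cases h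
    rcases hidx : PySem.List.index? (List.map String.singleton camino.toList) cp with _ | p
    · exact absurd hmem ((PySem.List.index?_eq_none_iff _ _).mp hidx)
    · obtain ⟨hp, _, _⟩ := PySem.List.getElem_of_index?_eq_some hidx
      rw [List.length_map] at hp
      simp only [List.length_map]
      -- A side: characterise the loop result and flatten the final string-building fold
      rw [pv_loop_inv camino.toList cp p hp camino.toList.length le_rfl]
      simp only []
      rw [PySem.List.foldl_pyRange_zero_pyGetD'
        ((List.range camino.toList.length).map
          (pvG camino.toList cp p camino.toList.length camino.toList.length))
        "" (fun acc s => acc ++ s) ""]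
      -- B side: characterise the generation fold and the two slices
      have hgen := pv_gen_fold cp (List.map String.singleton camino.toList) 0
      simp only [Nat.zero_add, List.range_zero, List.map_nil, Function.iterate_zero,
        id_eq, List.length_map] at hgen
      rw [hgen]
      simp only []
      have hneg : -((p : Int) + 1) = -(((p + 1 : Nat) : Int)) := by push_cast; ring
      rw [hneg, PySem.List.slice_from_neg_natCast _ _ (by omega),
        PySem.List.slice_to_neg_natCast _ _ (by omega)]
      simp only [List.length_map, List.length_range]
      rw [← pv_rotate_eq camino.toList cp p hp]

-- ===== VERDICT (by name: the statement is the Claim_ definition above) =====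
theorem pintar_baldosas_spec : Claim_equal_pintar_baldosas := by
  intro camino colores _ hpre
  apply pv_main
  simp only [Pre_pintar_baldosas, List.any_eq_true, beq_iff_eq] at hpre
  obtain ⟨c, hc, ch, hch, hceq⟩ := hpre
  exact ⟨c, hc, List.mem_map.mpr ⟨ch, hch,
    String.toList_inj.mp (by rw [hceq, String.toList_singleton])⟩⟩
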